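-- pv_equiv track=rewrite | github.com/allenai/scholarphi | data-processing/entities/definitions/commands/detect_definitions.py | check_text_contains_abbreviation_for_sanity
-- ===== SOURCE A (Python) =====
-- def check_text_contains_abbreviation_for_sanity(
--     abbreviation_text: str,
--     expansion_text: str,
--     abbreviation_start: int,
--     abbreviation_end: int,
--     expansion_start: int,
--     expansion_end: int,
-- ) -> bool:
--     """
--     Very smooth filter:
--     Outputs from our current abbreviation detector include lots of noise
--         e.g., "alpha x (Ref )" or any phrases with parenthesis
--     This function filters out the noise using simple heuristics.
--     """
--     # If abbreviation and expansion overlaps in positions, ignore them.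
--     if (
--         len(
--             set(range(abbreviation_start, abbreviation_end - 1)).intersection(
--                 range(expansion_start, expansion_end - 1)
--             )
--         )
--         > 0
--     ):
--         return False
--
--     # If citation patterns are detected (e.g., Citation (CITATION)), ignore them.
--     if "citation" in abbreviation_text.lower():
--         return False
--
--     # Check each letter in abbreviation appears in expansion text.
--     is_abbreviation = True
--     for letter_in_abbreviation in abbreviation_text.lower():
--         if letter_in_abbreviation not in expansion_text.lower():
--             is_abbreviation = False
--
--     return is_abbreviation
-- ===== SOURCE B (Python) =====
-- def check_text_contains_abbreviation_for_sanity(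
--     abbreviation_text: str,
--     expansion_text: str,
--     abbreviation_start: int,
--     abbreviation_end: int,
--     expansion_start: int,
--     expansion_end: int,
-- ) -> bool:
--     # Interval overlap by O(1) arithmetic instead of materialising the ranges.
--     if max(abbreviation_start, expansion_start) < min(abbreviation_end, expansion_end) - 1:
--         return False
--     low_abbreviation = abbreviation_text.lower()
--     if "citation" in low_abbreviation:
--         return False
--     # Membership against a precomputed set of the expansion's characters.
--     expansion_chars = set(expansion_text.lower())
--     return all(c in expansion_chars for c in set(low_abbreviation))
-- ===== Notes on version B (the rewrite author's own statement) =====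
-- stated objective: faster
-- what changed: Replaces the materialised set(range(...)).intersection(range(...)) overlap test by O(1) interval arithmetic, and the per-letter substring scans of the expansion by one precomputed character set queried once per distinct abbreviation character.
import Mathlib
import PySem

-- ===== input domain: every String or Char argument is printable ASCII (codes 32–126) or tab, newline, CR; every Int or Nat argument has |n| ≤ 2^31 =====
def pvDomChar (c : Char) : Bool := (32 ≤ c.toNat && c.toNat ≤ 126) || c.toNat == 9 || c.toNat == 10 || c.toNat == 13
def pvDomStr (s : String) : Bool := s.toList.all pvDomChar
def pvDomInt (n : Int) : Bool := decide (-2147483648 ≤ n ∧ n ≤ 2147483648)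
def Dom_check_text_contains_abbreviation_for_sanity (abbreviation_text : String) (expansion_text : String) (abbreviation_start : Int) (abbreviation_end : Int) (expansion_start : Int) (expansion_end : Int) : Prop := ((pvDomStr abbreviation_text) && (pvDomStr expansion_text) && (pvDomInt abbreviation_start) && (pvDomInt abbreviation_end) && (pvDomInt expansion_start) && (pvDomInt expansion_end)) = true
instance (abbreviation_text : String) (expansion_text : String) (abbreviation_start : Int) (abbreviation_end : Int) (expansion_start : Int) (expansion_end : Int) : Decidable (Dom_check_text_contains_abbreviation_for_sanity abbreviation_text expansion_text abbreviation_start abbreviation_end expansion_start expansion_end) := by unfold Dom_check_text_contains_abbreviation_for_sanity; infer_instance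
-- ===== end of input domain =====

-- B replaces the materialised range-set intersection by O(1) interval arithmetic and the
-- per-letter expansion scans by one precomputed character set (objective: faster).


-- ===== PORT A =====
def check_text_contains_abbreviation_for_sanity (abbreviation_text : String) (expansion_text : String) (abbreviation_start : Int) (abbreviation_end : Int) (expansion_start : Int) (expansion_end : Int) : Bool :=
  if 0 < (PySem.Set.inter
      (PySem.Set.ofList (PySem.List.pyRange abbreviation_start (abbreviation_end - 1)))
      (PySem.List.pyRange expansion_start (expansion_end - 1))).length then
    false
  else if PySem.Str.isIn "citation" (PySem.Str.lower abbreviation_text) then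
    false
  else
    (PySem.Str.lower abbreviation_text).toList.foldl
      (fun is_abbreviation letter_in_abbreviation =>
        if !(PySem.Chars.isIn [letter_in_abbreviation] (PySem.Str.lower expansion_text).toList) then
          false
        else is_abbreviation)
      true

-- ===== PORT B =====
def check_text_contains_abbreviation_for_sanity_alt (abbreviation_text : String) (expansion_text : String) (abbreviation_start : Int) (abbreviation_end : Int) (expansion_start : Int) (expansion_end : Int) : Bool :=
  if max abbreviation_start expansion_start < min abbreviation_end expansion_end - 1 then
    false
  else
    let low_abbreviation := (PySem.Str.lower abbreviation_text).toList
    if PySem.Chars.isIn "citation".toList low_abbreviation then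
      false
    else
      let expansion_chars : PySem.Set Char :=
        PySem.Set.ofList (PySem.Str.lower expansion_text).toList
      (PySem.Set.ofList low_abbreviation).all (fun c => expansion_chars.contains c)

-- ===== PRECONDITION & SPEC =====
def Spec_check_text_contains_abbreviation_for_sanity (abbreviation_text : String) (expansion_text : String) (abbreviation_start : Int) (abbreviation_end : Int) (expansion_start : Int) (expansion_end : Int) (out : Bool) : Prop := out = check_text_contains_abbreviation_for_sanity_alt abbreviation_text expansion_text abbreviation_start abbreviation_end expansion_start expansion_end
instance (abbreviation_text : String) (expansion_text : String) (abbreviation_start : Int) (abbreviation_end : Int) (expansion_start : Int) (expansion_end : Int) (out : Bool) : Decidable (Spec_check_text_contains_abbreviation_for_sanity abbreviation_text expansion_text abbreviation_start abbreviation_end expansion_start expansion_end out) := by unfold Spec_check_text_contains_abbreviation_for_sanity; infer_instance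

-- ===== CLAIM (what is proved, stated in full; the proofs are below) =====
def Claim_equal_check_text_contains_abbreviation_for_sanity : Prop := ∀ (abbreviation_text : String) (expansion_text : String) (abbreviation_start : Int) (abbreviation_end : Int) (expansion_start : Int) (expansion_end : Int), Dom_check_text_contains_abbreviation_for_sanity abbreviation_text expansion_text abbreviation_start abbreviation_end expansion_start expansion_end → Spec_check_text_contains_abbreviation_for_sanity abbreviation_text expansion_text abbreviation_start abbreviation_end expansion_start expansion_end (check_text_contains_abbreviation_for_sanity abbreviation_text expansion_text abbreviation_start abbreviation_end expansion_start expansion_end)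

-- ===== LEMMAS AND PROOFS =====

lemma overlap_iff (a b c d : Int) :
    (0 < (PySem.Set.inter (PySem.Set.ofList (PySem.List.pyRange a (b - 1)))
        (PySem.List.pyRange c (d - 1))).length) ↔ (max a c < min b d - 1) := by
  rw [List.length_pos_iff_exists_mem]
  constructor
  · rintro ⟨x, hx⟩
    rw [PySem.Set.mem_inter] at hx
    rw [PySem.Set.mem_ofList, PySem.List.mem_pyRange_one, PySem.List.mem_pyRange_one] at hx
    omega
  · intro h
    refine ⟨max a c, ?_⟩
    rw [PySem.Set.mem_inter, PySem.Set.mem_ofList, PySem.List.mem_pyRange_one,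
      PySem.List.mem_pyRange_one]
    omega

lemma isIn_singleton (c : Char) (s : List Char) :
    PySem.Chars.isIn [c] s = s.contains c := by
  by_cases h : c ∈ s
  · have h1 : PySem.Chars.isIn [c] s = true :=
      (PySem.Chars.isIn_iff_infix _ _).mpr ((List.singleton_infix_iff c s).mpr h)
    simp [h1, h]
  · have h1 : PySem.Chars.isIn [c] s = false := by
      rw [Bool.eq_false_iff, Ne, PySem.Chars.isIn_iff_infix]
      intro hinf; exact h (hinf.subset (by simp))
    simp [h1, h]

lemma loop_eq_all (la le : List Char) :
    la.foldl (fun is_ab c => if !(PySem.Chars.isIn [c] le) then false else is_ab) true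
      = (PySem.Set.ofList la).all (fun c => (PySem.Set.ofList le : PySem.Set Char).contains c) := by
  rw [PySem.List.foldl_if_false_eq (p := fun c => !(PySem.Chars.isIn [c] le))]
  rw [Bool.eq_iff_iff]
  simp [List.all_eq_true, isIn_singleton, PySem.Set.mem_ofList, PySem.Set.contains]

theorem check_text_contains_abbreviation_for_sanity_spec : Claim_equal_check_text_contains_abbreviation_for_sanity := by
  intro a e as ae es ee _
  unfold Spec_check_text_contains_abbreviation_for_sanity
  unfold check_text_contains_abbreviation_for_sanity check_text_contains_abbreviation_for_sanity_alt
  by_cases hov : max as es < min ae ee - 1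
  · rw [if_pos hov, if_pos ((overlap_iff as ae es ee).mpr hov)]
  · rw [if_neg hov, if_neg (by rw [overlap_iff]; exact hov)]
    simp only []
    by_cases hc : PySem.Chars.isIn "citation".toList (PySem.Str.lower a).toList = true
    · rw [if_pos (by simpa using hc), if_pos hc]
    · rw [if_neg (by simpa using hc), if_neg hc]
      exact loop_eq_all _ _
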